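-- pv_equiv track=rewrite | github.com/dgalvan-zz/CIS-61-Structure-Interpretation-of-Computer-Programs-Fall-2023 | add_characters/main.py | add_chars
-- ===== SOURCE A (Python) =====
-- def add_chars(w1, w2):
--     """
--     Return a string containing the characters you need to add to w1 to get w2.
--     You may assume that w1 is a subsequence of w2.
--
--     >>> add_chars("owl", "howl")
--     'h'
--     >>> add_chars("want", "wanton")
--     'on'
--     >>> add_chars("rat", "radiate")
--     'diae'
--     >>> add_chars("a", "prepare")
--     'prepre'
--     >>> add_chars("resin", "recursion")
--     'curo'
--     >>> add_chars("fin", "effusion")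
--     'efuso'
--     >>> add_chars("coy", "cacophony")
--     'acphon'
--     """
--     "*** YOUR CODE HERE ***"
--
--     if len(w1) == 0:
--         # If w1 is empty, return the remaining characters from w2
--         return w2
--     elif len(w2) == 0:
--         # If w2 is empty but w1 still has characters, return an empty string
--         return ""
--     elif w1[0] == w2[0]:
--         # If the first characters of both words match, move to the next character
--         return add_chars(w1[1:], w2[1:])
--     else:
--         # If they don't match, add the character from w2 to the result
--         return w2[0] + add_chars(w1, w2[1:])
-- ===== SOURCE B (Python) =====
-- def add_chars(w1, w2):
--     out = []
--     i = 0
--     for c in w2: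
--         if i < len(w1) and w1[i] == c:
--             i += 1
--         else:
--             out.append(c)
--     return ''.join(out)
-- ===== Notes on version B (the rewrite author's own statement) =====
-- stated objective: faster
-- what changed: Replaced the recursive solution that slices both strings and concatenates on every step with a single two-pointer pass over w2 collecting unmatched characters into a list joined once at the end.
import Mathlib
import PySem

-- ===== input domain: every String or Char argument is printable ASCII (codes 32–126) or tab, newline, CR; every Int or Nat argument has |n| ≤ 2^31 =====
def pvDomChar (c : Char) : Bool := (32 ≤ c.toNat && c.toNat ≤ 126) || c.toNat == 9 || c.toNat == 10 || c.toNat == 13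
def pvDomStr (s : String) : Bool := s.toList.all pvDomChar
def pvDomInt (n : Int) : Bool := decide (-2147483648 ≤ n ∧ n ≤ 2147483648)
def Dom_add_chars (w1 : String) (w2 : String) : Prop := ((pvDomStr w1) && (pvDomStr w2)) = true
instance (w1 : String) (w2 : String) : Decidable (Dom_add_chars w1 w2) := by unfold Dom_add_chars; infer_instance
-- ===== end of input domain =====

-- B replaces A's quadratic slice-and-concat recursion with a single two-pointer pass over w2 (faster, asymptotic).


-- ===== PORT A =====
-- literal recursion of A over the character lists: empty checks, first-char compare, slices [1:]
def addCharsRec : List Char → List Char → List Char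
  | [], l2 => l2
  | _ :: _, [] => []
  | a :: l1, b :: l2 =>
      if a = b then addCharsRec l1 l2
      else b :: addCharsRec (a :: l1) l2
  termination_by _ l2 => l2.length

def add_chars (w1 : String) (w2 : String) : String :=
  String.ofList (addCharsRec w1.toList w2.toList)

-- ===== PORT B =====
-- B's loop: for c in w2, advance pointer i into w1 on a match, otherwise append c to out
def addCharsLoop (l1 : List Char) (l2 : List Char) : Nat × List Char :=
  l2.foldl
    (fun (st : Nat × List Char) c =>
      if st.1 < l1.length ∧ l1.getD st.1 ' ' = c then (st.1 + 1, st.2)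
      else (st.1, st.2 ++ [c]))
    (0, [])

def add_chars_alt (w1 : String) (w2 : String) : String :=
  String.ofList (addCharsLoop w1.toList w2.toList).2

-- ===== PRECONDITION & SPEC =====
def Spec_add_chars (w1 : String) (w2 : String) (out : String) : Prop := out = add_chars_alt w1 w2
instance (w1 : String) (w2 : String) (out : String) : Decidable (Spec_add_chars w1 w2 out) := by unfold Spec_add_chars; infer_instance

-- ===== CLAIM (what is proved, stated in full; the proofs are below) =====
def Claim_equal_add_chars : Prop := ∀ (w1 : String) (w2 : String), Dom_add_chars w1 w2 → Spec_add_chars w1 w2 (add_chars w1 w2)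

-- ===== LEMMAS AND PROOFS =====

theorem addCharsRec_nil_right : ∀ (l1 : List Char), addCharsRec l1 [] = [] := by
  intro l1; cases l1 <;> simp [addCharsRec]

theorem addCharsLoop_invariant :
    ∀ (l2 l1 : List Char) (i : Nat) (acc : List Char),
      (l2.foldl
        (fun (st : Nat × List Char) c =>
          if st.1 < l1.length ∧ l1.getD st.1 ' ' = c then (st.1 + 1, st.2)
          else (st.1, st.2 ++ [c]))
        (i, acc)).2 = acc ++ addCharsRec (l1.drop i) l2 := by
  intro l2
  induction l2 with
  | nil => intro l1 i acc; simp [addCharsRec_nil_right]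
  | cons c t ih =>
    intro l1 i acc
    by_cases h : i < l1.length
    · have hdrop : l1.drop i = l1[i] :: l1.drop (i + 1) := List.drop_eq_getElem_cons h
      have hgetD : l1.getD i ' ' = l1[i] := List.getD_eq_getElem l1 ' ' h
      by_cases hc : l1[i] = c
      · have hcond : i < l1.length ∧ l1.getD i ' ' = c := ⟨h, hgetD.trans hc⟩
        simp only [List.foldl_cons, if_pos hcond]
        rw [ih, hdrop, addCharsRec, if_pos hc]
      · have hcond : ¬ (i < l1.length ∧ l1.getD i ' ' = c) := by
          rintro ⟨_, h2⟩; exact hc (hgetD.symm.trans h2)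
        simp only [List.foldl_cons, if_neg hcond]
        rw [ih, hdrop, addCharsRec, if_neg hc]
        simp
    · have hdrop : l1.drop i = [] := List.drop_eq_nil_of_le (Nat.le_of_not_lt h)
      have hcond : ¬ (i < l1.length ∧ l1.getD i ' ' = c) := by rintro ⟨h1, _⟩; exact h h1
      simp only [List.foldl_cons, if_neg hcond]
      rw [ih, hdrop]
      simp [addCharsRec]

-- ===== VERDICT (by name: the statement is the Claim_ definition above) =====
theorem add_chars_spec : Claim_equal_add_chars := by
  intro w1 w2 _
  unfold Spec_add_chars add_chars add_chars_alt addCharsLoop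
  rw [addCharsLoop_invariant]
  simp
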